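-- pv_equiv track=rewrite | github.com/sallyklpoon/leetcode-carnival | LeetCode/Easy/492_construct_rectangle/492_construct_rectangle.py | construct_rectangle
-- ===== SOURCE A (Python) =====
-- def construct_rectangle(area: int) -> list:
--     """
--     Construct a rectangle with the minimum difference between length and width.
--
--     Time Complexity - O(N), however, time limit exceeded in LC runtime
--     Space Complexity - O(1)
--
--     :param area: int
--     :return: list of int, the width and length dimensions
--     """
--     output, ratio = [0, 0], area
--
--     for i in range(1, area + 1):
--         dividend = area // i
--         if area % i == 0 and abs(i - dividend) < ratio:
--             output = [dividend, i]
--             ratio = abs(i - dividend)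
--
--     return output
-- ===== SOURCE B (Python) =====
-- def construct_rectangle(area: int) -> list:
--     # Scan candidate widths up to sqrt(area); keep the largest divisor seen.
--     width, i = 0, 1
--     while i * i <= area:
--         if area % i == 0:
--             width = i
--         i += 1
--     if width == 0:
--         return [0, 0]
--     return [area // width, width]
-- ===== Notes on version B (the rewrite author's own statement) =====
-- stated objective: faster
-- what changed: Replaces the full O(area) scan over every i in 1..area (tracking the pair with minimal difference) by a single loop over i with i*i <= area that keeps the largest divisor not exceeding sqrt(area), from which the answer pair is computed once.
import Mathlib
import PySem

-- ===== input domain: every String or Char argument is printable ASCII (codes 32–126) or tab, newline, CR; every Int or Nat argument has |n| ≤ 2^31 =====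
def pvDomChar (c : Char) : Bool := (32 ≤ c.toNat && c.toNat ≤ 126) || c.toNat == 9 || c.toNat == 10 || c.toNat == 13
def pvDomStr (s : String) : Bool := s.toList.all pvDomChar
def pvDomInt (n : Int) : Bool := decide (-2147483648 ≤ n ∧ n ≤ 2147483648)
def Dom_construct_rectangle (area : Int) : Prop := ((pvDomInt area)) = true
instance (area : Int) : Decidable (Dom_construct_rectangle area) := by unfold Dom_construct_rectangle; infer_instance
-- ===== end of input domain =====

-- B replaces A's O(area) scan of all i in 1..area by a loop only while i*i ≤ area
-- that keeps the largest divisor found; objective: faster (asymptotic, O(sqrt(area))).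

-- ===== PORT A =====
-- one step of A's for-loop body: state = (output, ratio)
def pvAStep (area : Int) (st : List Int × Int) (i : Int) : List Int × Int :=
  let dividend := PySem.Int.floordiv area i
  if PySem.Int.mod area i = 0 ∧ |i - dividend| < st.2
  then ([dividend, i], |i - dividend|)
  else st

def construct_rectangle (area : Int) : List Int :=
  ((PySem.List.pyRange 1 (area + 1) 1).foldl (pvAStep area) ([0, 0], area)).1

-- ===== PORT B =====
-- B's while loop: i counts up while i*i ≤ area, width := i whenever i divides area
-- (fuel is a totality guard only: area.toNat + 1 iterations are more than the loop can take)
def pvBLoop (area : Int) (fuel : Nat) (width : Int) (i : Nat) : Int :=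
  match fuel with
  | 0 => width
  | fuel + 1 =>
    if (i : Int) * (i : Int) ≤ area then
      pvBLoop area fuel (if PySem.Int.mod area (i : Int) = 0 then (i : Int) else width) (i + 1)
    else width

def construct_rectangle_alt (area : Int) : List Int :=
  let width := pvBLoop area (area.toNat + 1) 0 1
  if width = 0 then [0, 0] else [PySem.Int.floordiv area width, width]

-- ===== PRECONDITION & SPEC =====
def Spec_construct_rectangle (area : Int) (out : List Int) : Prop := out = construct_rectangle_alt area
instance (area : Int) (out : List Int) : Decidable (Spec_construct_rectangle area out) := by unfold Spec_construct_rectangle; infer_instance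

-- ===== CLAIM (what is proved, stated in full; the proofs are below) =====
def Claim_equal_construct_rectangle : Prop := ∀ (area : Int), Dom_construct_rectangle area → Spec_construct_rectangle area (construct_rectangle area)

-- ===== LEMMAS AND PROOFS =====

-- the property characterizing both programs' final width: the largest divisor w of a with w*w ≤ a
def pvGoodW (a w : Int) : Prop :=
  1 ≤ w ∧ w * w ≤ a ∧ w ∣ a ∧ ∀ j : Int, w < j → j * j ≤ a → ¬ j ∣ a

-- loop invariant of A's fold over range(1, k+1) with k = n+1:
-- the state is ([a//w, w], a//w - w) for w the largest divisor ≤ k with w*w ≤ a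
lemma pvA_inv (a : Int) (ha : 1 ≤ a) : ∀ n : Nat, (n:Int) + 1 ≤ a →
    ∃ w : Int, 1 ≤ w ∧ w ≤ (n:Int) + 1 ∧ w * w ≤ a ∧ w ∣ a ∧
      ((PySem.List.pyRange 1 ((n:Int)+2) 1).foldl (pvAStep a) ([0,0], a))
        = ([PySem.Int.floordiv a w, w], PySem.Int.floordiv a w - w) ∧
      ∀ j : Int, w < j → j ≤ (n:Int) + 1 → j * j ≤ a → ¬ j ∣ a := by
  intro n
  induction n with
  | zero =>
    intro _
    refine ⟨1, le_rfl, by omega, by omega, one_dvd a, ?_, by omega⟩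
    have hr : PySem.List.pyRange 1 (((0:Nat):Int)+2) 1 = [1] := by decide
    have hm1 : PySem.Int.mod a 1 = 0 := (PySem.Int.mod_eq_zero_iff_dvd a 1).mpr (one_dvd a)
    have hf1 : PySem.Int.floordiv a 1 = a := by
      rw [PySem.Int.floordiv_eq_ediv_of_pos one_pos, Int.ediv_one]
    have habs : |(1:Int) - a| = a - 1 := by rw [abs_of_nonpos (by omega)]; ring
    rw [hr]
    simp only [List.foldl, pvAStep, hf1]
    rw [if_pos ⟨hm1, by rw [habs]; omega⟩, habs]
  | succ n IH =>
    intro hle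
    obtain ⟨w, hw1, hwk, hwsq, hwd, hst, hmax⟩ := IH (by push_cast at hle ⊢; omega)
    set i : Int := (n:Int) + 2 with hidef
    have hsplit : PySem.List.pyRange 1 (((n+1:Nat):Int)+2) 1
        = PySem.List.pyRange 1 ((n:Int)+2) 1 ++ [i] := by
      have e : ((n+1:Nat):Int)+2 = ((n:Int)+2)+1 := by push_cast; ring
      rw [e, PySem.List.pyRange_one_succ_right (by omega)]
    have hia : i ≤ a := by push_cast at hle; omega
    have hwi : w < i := by omega
    have hw0 : (0:Int) < w := by omega
    have hfw : PySem.Int.floordiv a w = a / w := PySem.Int.floordiv_eq_ediv_of_pos hw0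
    have hp : w * (a / w) = a := Int.mul_ediv_cancel' hwd
    set p : Int := a / w with hpdef
    rw [hsplit, List.foldl_append, hst]
    by_cases hdvd : i ∣ a
    · have hfi : PySem.Int.floordiv a i = a / i := PySem.Int.floordiv_eq_ediv_of_pos (by omega)
      have hq : i * (a / i) = a := Int.mul_ediv_cancel' hdvd
      set q : Int := a / i with hqdef
      have hmod : PySem.Int.mod a i = 0 := (PySem.Int.mod_eq_zero_iff_dvd a i).mpr hdvd
      by_cases hsq : i * i ≤ a
      · -- i is a new, better divisor: the state is updated to ([a//i, i], a//i - i)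
        have hiq : i ≤ q := by nlinarith
        have habs : |i - q| = q - i := by rw [abs_of_nonpos (by omega)]; ring
        have hqp : q < p := by nlinarith [mul_pos (show (0:Int) < i - w by omega) (show (0:Int) < q by omega)]
        refine ⟨i, by omega, by push_cast; omega, hsq, hdvd, ?_, by push_cast; omega⟩
        simp only [List.foldl, pvAStep, hfi]
        rw [if_pos ⟨hmod, by rw [habs, hfw]; omega⟩]
        rw [habs]
      · -- i divides a but i*i > a: its mirror q = a//i was already seen, no update
        have hqi : q < i := by nlinarith
        have hq1 : 1 ≤ q := by nlinarith
        have hqsq : q * q ≤ a := by nlinarith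
        have hqd : q ∣ a := ⟨i, by rw [← hq]; ring⟩
        have hqw : q ≤ w := by
          by_contra h
          exact hmax q (by omega) (by omega) hqsq hqd
        have hpi : p ≤ i := by nlinarith
        have habs : |i - q| = i - q := abs_of_nonneg (by omega)
        refine ⟨w, hw1, by push_cast; omega, hwsq, hwd, ?_, ?_⟩
        · simp only [List.foldl, pvAStep, hfi, habs]
          rw [if_neg]
          rintro ⟨-, hlt⟩
          rw [hfw] at hlt; omega
        · intro j hj hjk hjsq hjd
          push_cast at hjk
          rcases lt_or_ge j i with hji | hji
          · exact hmax j hj (by omega) hjsq hjd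
          · have : j = i := by omega
            subst this; omega
    · -- i does not divide a: no update
      have hmod : ¬ PySem.Int.mod a i = 0 := by
        rw [PySem.Int.mod_eq_zero_iff_dvd]; exact hdvd
      refine ⟨w, hw1, by push_cast; omega, hwsq, hwd, ?_, ?_⟩
      · simp only [List.foldl, pvAStep]
        rw [if_neg]
        rintro ⟨hm, -⟩
        exact hmod hm
      · intro j hj hjk hjsq hjd
        push_cast at hjk
        rcases lt_or_ge j i with hji | hji
        · exact hmax j hj (by omega) hjsq hjd
        · have : j = i := by omega
          subst this; exact hdvd hjd

lemma pvA_char (a : Int) (ha : 1 ≤ a) :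
    ∃ w : Int, pvGoodW a w ∧ construct_rectangle a = [PySem.Int.floordiv a w, w] := by
  obtain ⟨w, hw1, hwk, hwsq, hwd, hst, hmax⟩ := pvA_inv a ha (a - 1).toNat (by omega)
  have hn : ((a - 1).toNat : Int) = a - 1 := by omega
  rw [hn] at hst hmax
  refine ⟨w, ⟨hw1, hwsq, hwd, ?_⟩, ?_⟩
  · intro j hj hjsq hjd
    have hj1 : 1 ≤ j := by omega
    have hja : j ≤ a := by nlinarith
    exact hmax j hj (by omega) hjsq hjd
  · unfold construct_rectangle
    have : a - 1 + 2 = a + 1 := by ring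
    rw [this] at hst
    rw [hst]

lemma pvB_loop_eq (a ws : Int) (hW : pvGoodW a ws) :
    ∀ (fuel i : Nat) (w : Int), 1 ≤ i → a < ((i + fuel : Nat) : Int) * ((i + fuel : Nat) : Int) →
      ((i:Int) ≤ ws ∨ w = ws) → pvBLoop a fuel w i = ws := by
  obtain ⟨h1, h2, h3, h4⟩ := hW
  have hterm : ∀ (i : Nat) (w : Int), ¬ (i:Int) * (i:Int) ≤ a → ((i:Int) ≤ ws ∨ w = ws) → w = ws := by
    intro i w hsq hw
    rcases hw with h | h
    · exfalso
      have h0 : (0:Int) ≤ (i:Int) := by positivity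
      have : (i:Int) * (i:Int) ≤ ws * ws := mul_le_mul h h h0 (by omega)
      omega
    · exact h
  intro fuel
  induction fuel with
  | zero =>
    intro i w hi hfuel hw
    refine hterm i w (fun hle => ?_) hw
    push_cast at hfuel
    nlinarith
  | succ fuel IH =>
    intro i w hi hfuel hw
    rw [pvBLoop]
    split
    · rename_i hsq
      refine IH (i+1) _ (by omega) (by push_cast at hfuel ⊢; ring_nf at hfuel ⊢; exact hfuel) ?_
      rcases lt_trichotomy (i:Int) ws with hlt | heq | hgt
      · exact Or.inl (by push_cast; omega)
      · refine Or.inr ?_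
        have : PySem.Int.mod a (i:Int) = 0 := by
          rw [PySem.Int.mod_eq_zero_iff_dvd]; rw [heq]; exact h3
        rw [if_pos this]; exact heq
      · refine Or.inr ?_
        rcases hw with h | h
        · omega
        · have hnd : ¬ (i:Int) ∣ a := h4 _ hgt hsq
          have : ¬ PySem.Int.mod a (i:Int) = 0 := by
            rw [PySem.Int.mod_eq_zero_iff_dvd]; exact hnd
          rw [if_neg this]; exact h
    · rename_i hsq
      exact hterm i w hsq hw

-- ===== VERDICT (by name: the statement is the Claim_ definition above) =====
theorem construct_rectangle_spec : Claim_equal_construct_rectangle := by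
  intro area _
  unfold Spec_construct_rectangle
  by_cases ha : 1 ≤ area
  · obtain ⟨w, hW, hA⟩ := pvA_char area ha
    have hfuel : area < (((1 + (area.toNat + 1)) : Nat) : Int) * (((1 + (area.toNat + 1)) : Nat) : Int) := by
      push_cast
      have ht : (area.toNat : Int) = area := by omega
      rw [ht]; nlinarith
    have hB : pvBLoop area (area.toNat + 1) 0 1 = w :=
      pvB_loop_eq area w hW (area.toNat + 1) 1 0 le_rfl hfuel (Or.inl (by exact_mod_cast hW.1))
    have hw0 : w ≠ 0 := by have := hW.1; omega
    simp [construct_rectangle_alt, hB, hw0, hA]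
  · have hr : PySem.List.pyRange 1 (area + 1) 1 = [] :=
      PySem.List.pyRange_one_eq_nil (by omega)
    have hn : area.toNat + 1 = 1 := by omega
    have hB : pvBLoop area (area.toNat + 1) 0 1 = 0 := by
      rw [hn, pvBLoop]
      rw [if_neg (by push_cast; omega)]
    simp [construct_rectangle, construct_rectangle_alt, hr, hB]
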